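-- pv_equiv track=rewrite | github.com/EncapsulatorP/Fixed-Point-Shadow | src/collatz.py | count_discrete_fixed_points
-- ===== SOURCE A (Python) =====
-- def collatz_step(n: int) -> int:
--     """Apply one step of the standard Collatz map.
--
--     F(n) = n/2       if n is even
--     F(n) = 3n + 1    if n is odd
--
--     Parameters
--     ----------
--     n:
--         A positive integer.
--
--     Raises
--     ------
--     ValueError:
--         If n < 1.
--     """
--     if n < 1:
--         raise ValueError(f"collatz_step requires a positive integer, got {n}")
--     return n // 2 if n % 2 == 0 else 3 * n + 1
--
-- def count_discrete_fixed_points(period: int, upper: int) -> int: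
--     """Count integers in [1, upper] that are periodic under the Collatz map
--     with period dividing *period*.
--
--     For the standard Collatz map the only known cycle is {1, 2} (period 2
--     under the convention F(1) = 4, F(2) = 1 — reachable from 1 → 4 → 2 → 1
--     — or equivalently the cycle 1 → 4 → 2 → 1 has period 3 under the
--     standard map).  This function counts by direct iteration up to *upper*.
--
--     Notes
--     -----
--     This is a *finite approximation* of |Fix(Fⁿ)| restricted to [1, upper].
--     It is used only to illustrate the dynamical zeta construction; the full
--     count over all of ℤ₊ is unknown for most periods > 1.
--     """
--     count = 0
--     for n in range(1, upper + 1):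
--         cur = n
--         found = False
--         for _ in range(period):
--             cur = collatz_step(cur)
--             if cur > upper * 10:
--                 break
--         if cur == n:
--             found = True
--         count += int(found)
--     return count
-- ===== SOURCE B (Python) =====
-- def count_discrete_fixed_points(period: int, upper: int) -> int:
--     """Count n in [1, upper] with F^period(n) == n (A's bounded convention).
--
--     Different strategy: members of the known cycle {1, 2, 4} are counted by
--     the closed form 'period % 3 == 0'; every other n is simulated only until
--     its orbit either exceeds the bound or falls into that cycle (it can then
--     never return to n), so the work per n is independent of `period`.
--     """
--     if upper < 1:
--         return 0
--     if period <= 0: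
--         return upper
--     bound = upper * 10
--     count = 0
--     for n in range(1, upper + 1):
--         if n in (1, 2, 4):
--             if period % 3 == 0:
--                 count += 1
--         else:
--             cur = n
--             for _ in range(period):
--                 cur = 3 * cur + 1 if cur % 2 else cur // 2
--                 if cur > bound or cur in (1, 2, 4):
--                     break
--             if cur == n:
--                 count += 1
--     return count
-- ===== Notes on version B (the rewrite author's own statement) =====
-- stated objective: faster
-- what changed: Instead of simulating exactly `period` Collatz steps for every n, B counts members of the cycle {1,2,4} by the closed form period % 3 == 0, handles period <= 0 and upper < 1 by closed forms, and for every other n stops simulating as soon as the orbit exceeds the bound or falls into {1,2,4} (from which it can never return to n), so per-point work is independent of period.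
import Mathlib
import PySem

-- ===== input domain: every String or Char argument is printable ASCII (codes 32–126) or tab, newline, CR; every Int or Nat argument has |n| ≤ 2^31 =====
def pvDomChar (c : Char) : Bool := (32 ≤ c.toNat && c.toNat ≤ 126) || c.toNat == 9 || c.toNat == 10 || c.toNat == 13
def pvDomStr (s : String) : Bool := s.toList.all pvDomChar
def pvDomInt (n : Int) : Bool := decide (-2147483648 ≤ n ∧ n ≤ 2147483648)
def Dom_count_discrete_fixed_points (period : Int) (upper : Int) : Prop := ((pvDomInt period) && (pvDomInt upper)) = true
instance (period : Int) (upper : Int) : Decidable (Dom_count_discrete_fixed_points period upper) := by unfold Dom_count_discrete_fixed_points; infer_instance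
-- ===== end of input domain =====

-- B replaces A's fixed `period`-step simulation per point by a closed form (period % 3 == 0)
-- on the cycle {1,2,4} and an early exit once an orbit falls into that cycle or exceeds the
-- bound, making the per-point work independent of `period` (objective: faster).

-- ===== PORT A =====
-- Python's collatz_step raises ValueError for n < 1; that branch is unreachable from the
-- entry (cur stays ≥ 1 throughout), so it is modeled here by the junk value 0.
def collatz_step (n : Int) : Int :=
  if n < 1 then 0
  else if PySem.Int.mod n 2 = 0 then PySem.Int.floordiv n 2 else 3 * n + 1

-- the inner `for _ in range(period)` loop body of A, on state (cur, broken)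
def pvStepA (upper : Int) (s : Int × Bool) : Int × Bool :=
  if s.2 then s
  else
    let cur := collatz_step s.1
    (cur, decide (upper * 10 < cur))

def count_discrete_fixed_points (period : Int) (upper : Int) : Int :=
  (PySem.List.pyRange 1 (upper + 1) 1).foldl (fun count n =>
    let st := (PySem.List.pyRange 0 period 1).foldl (fun s _ => pvStepA upper s) (n, false)
    count + (if st.1 = n then 1 else 0)) 0

-- ===== PORT B =====
-- the inner loop body of B (inline step; extra break once cur falls into {1,2,4})
def pvStepB (upper : Int) (s : Int × Bool) : Int × Bool :=
  if s.2 then s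
  else
    let cur := if PySem.Int.mod s.1 2 ≠ 0 then 3 * s.1 + 1 else PySem.Int.floordiv s.1 2
    (cur, decide (upper * 10 < cur ∨ cur = 1 ∨ cur = 2 ∨ cur = 4))

def count_discrete_fixed_points_alt (period : Int) (upper : Int) : Int :=
  if upper < 1 then 0
  else if period ≤ 0 then upper
  else
    (PySem.List.pyRange 1 (upper + 1) 1).foldl (fun count n =>
      if n = 1 ∨ n = 2 ∨ n = 4 then
        count + (if PySem.Int.mod period 3 = 0 then 1 else 0)
      else
        let st := (PySem.List.pyRange 0 period 1).foldl (fun s _ => pvStepB upper s) (n, false)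
        count + (if st.1 = n then 1 else 0)) 0

-- ===== PRECONDITION & SPEC =====
def Spec_count_discrete_fixed_points (period : Int) (upper : Int) (out : Int) : Prop := out = count_discrete_fixed_points_alt period upper
instance (period : Int) (upper : Int) (out : Int) : Decidable (Spec_count_discrete_fixed_points period upper out) := by unfold Spec_count_discrete_fixed_points; infer_instance

-- ===== CLAIM (what is proved, stated in full; the proofs are below) =====
def Claim_equal_count_discrete_fixed_points : Prop := ∀ (period : Int) (upper : Int), Dom_count_discrete_fixed_points period upper → Spec_count_discrete_fixed_points period upper (count_discrete_fixed_points period upper)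

-- ===== LEMMAS AND PROOFS =====

-- membership in the cycle {1, 2, 4}
def pvC (c : Int) : Prop := c = 1 ∨ c = 2 ∨ c = 4

lemma pv_foldl_iter {α β : Type} (g : α → α) (l : List β) (init : α) :
    l.foldl (fun s _ => g s) init = g^[l.length] init := by
  induction l generalizing init with
  | nil => rfl
  | cons a t ih => simp [List.foldl_cons, ih, Function.iterate_succ_apply]

lemma pv_stuck (f : Int × Bool → Int × Bool)
    (hf : ∀ c, f (c, true) = (c, true)) (k : Nat) (c : Int) :
    f^[k] (c, true) = (c, true) := by
  induction k with
  | zero => rfl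
  | succ k ih => rw [Function.iterate_succ_apply, hf, ih]

lemma pvStepA_stuck (upper c : Int) : pvStepA upper (c, true) = (c, true) := rfl
lemma pvStepB_stuck (upper c : Int) : pvStepB upper (c, true) = (c, true) := rfl

lemma pv_step_C {c : Int} (hc : pvC c) : pvC (collatz_step c) ∧ collatz_step c ≤ 4 := by
  rcases hc with rfl | rfl | rfl
  · exact ⟨by rw [show collatz_step 1 = 4 from by decide]; exact Or.inr (Or.inr rfl), by decide⟩
  · exact ⟨by rw [show collatz_step 2 = 1 from by decide]; exact Or.inl rfl, by decide⟩
  · exact ⟨by rw [show collatz_step 4 = 2 from by decide]; exact Or.inr (Or.inl rfl), by decide⟩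

lemma pv_step_pos {c : Int} (hc : 1 ≤ c) : 1 ≤ collatz_step c := by
  have hm : PySem.Int.mod c 2 = c % 2 := PySem.Int.mod_eq_emod_of_pos (by norm_num)
  have hd : PySem.Int.floordiv c 2 = c / 2 := PySem.Int.floordiv_eq_ediv_of_pos (by norm_num)
  unfold collatz_step
  rw [if_neg (by omega), hm, hd]
  split_ifs with h2 <;> omega

lemma pv_step_eq {c : Int} (hc : 1 ≤ c) :
    (if PySem.Int.mod c 2 ≠ 0 then 3 * c + 1 else PySem.Int.floordiv c 2) = collatz_step c := by
  unfold collatz_step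
  rw [if_neg (show ¬ c < 1 by omega)]
  by_cases h2 : PySem.Int.mod c 2 = 0
  · rw [if_neg (not_not_intro h2), if_pos h2]
  · rw [if_pos h2, if_neg h2]

lemma pv_iterA_C {upper : Int} (hu : 1 ≤ upper) :
    ∀ (k : Nat) (c : Int), pvC c →
      (pvStepA upper)^[k] (c, false) = (collatz_step^[k] c, false) := by
  intro k
  induction k with
  | zero => intro c _; rfl
  | succ k ih =>
      intro c hc
      obtain ⟨hC', hle⟩ := pv_step_C hc
      have hflag : pvStepA upper (c, false) = (collatz_step c, false) := by
        simp only [pvStepA]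
        simp only [if_neg Bool.false_ne_true]
        have : ¬ (upper * 10 < collatz_step c) := by omega
        simp [this]
      rw [Function.iterate_succ_apply, hflag, ih _ hC',
        Function.iterate_succ_apply]

lemma pv_iter_memC {c : Int} (hc : pvC c) (k : Nat) : pvC (collatz_step^[k] c) := by
  induction k with
  | zero => exact hc
  | succ k ih => rw [Function.iterate_succ_apply']; exact (pv_step_C ih).1

lemma pv_f3 {c : Int} (hc : pvC c) : collatz_step^[3] c = c := by
  rcases hc with rfl | rfl | rfl <;> decide

lemma pv_iter_mod3 {c : Int} (hc : pvC c) (k : Nat) :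
    collatz_step^[k] c = collatz_step^[k % 3] c := by
  have h3q : ∀ q : Nat, collatz_step^[3 * q] c = c := by
    intro q
    induction q with
    | zero => rfl
    | succ q ih =>
        have : 3 * (q + 1) = 3 * q + 3 := by ring
        rw [this, Function.iterate_add_apply, pv_f3 hc, ih]
  conv_lhs => rw [show k = k % 3 + 3 * (k / 3) by omega]
  rw [Function.iterate_add_apply, h3q]

lemma pv_fix_iff {c : Int} (hc : pvC c) (k : Nat) :
    collatz_step^[k] c = c ↔ k % 3 = 0 := by
  rw [pv_iter_mod3 hc]
  have hr : k % 3 = 0 ∨ k % 3 = 1 ∨ k % 3 = 2 := by omega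
  rcases hr with h | h | h <;> rw [h] <;>
    rcases hc with rfl | rfl | rfl <;> simp <;> decide

lemma pv_agree {upper n : Int} (hu : 1 ≤ upper) (hn : ¬ pvC n) :
    ∀ (k : Nat) (c : Int), 1 ≤ c →
      (((pvStepA upper)^[k] (c, false)).1 = n ↔ ((pvStepB upper)^[k] (c, false)).1 = n) := by
  intro k
  induction k with
  | zero => intro c _; exact Iff.rfl
  | succ k ih =>
      intro c hc
      have hc' : 1 ≤ collatz_step c := pv_step_pos hc
      have hA1 : pvStepA upper (c, false)
          = (collatz_step c, decide (upper * 10 < collatz_step c)) := rfl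
      have hB1 : pvStepB upper (c, false)
          = (collatz_step c, decide (upper * 10 < collatz_step c ∨ collatz_step c = 1 ∨
              collatz_step c = 2 ∨ collatz_step c = 4)) := by
        have h := congrArg (fun cur : Int =>
            (cur, decide (upper * 10 < cur ∨ cur = 1 ∨ cur = 2 ∨ cur = 4))) (pv_step_eq hc)
        exact h
      rw [Function.iterate_succ_apply, Function.iterate_succ_apply, hA1, hB1]
      by_cases hgt : upper * 10 < collatz_step c
      · have dA : decide (upper * 10 < collatz_step c) = true := by simp [hgt]
        have dB : decide (upper * 10 < collatz_step c ∨ collatz_step c = 1 ∨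
            collatz_step c = 2 ∨ collatz_step c = 4) = true := by simp [hgt]
        rw [dA, dB, pv_stuck _ (pvStepA_stuck upper), pv_stuck _ (pvStepB_stuck upper)]
      · have dA : decide (upper * 10 < collatz_step c) = false := by simp [hgt]
        by_cases hCc : pvC (collatz_step c)
        · have dB : decide (upper * 10 < collatz_step c ∨ collatz_step c = 1 ∨
              collatz_step c = 2 ∨ collatz_step c = 4) = true := by
            rcases hCc with h | h | h <;> simp [h]
          rw [dA, dB, pv_stuck _ (pvStepB_stuck upper), pv_iterA_C hu k _ hCc]
          have hcyc : pvC (collatz_step^[k] (collatz_step c)) := pv_iter_memC hCc k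
          constructor
          · intro h; exact absurd (h ▸ hcyc) hn
          · intro h; exact absurd (h ▸ hCc) hn
        · have dB : decide (upper * 10 < collatz_step c ∨ collatz_step c = 1 ∨
              collatz_step c = 2 ∨ collatz_step c = 4) = false := by
            simp only [pvC] at hCc
            simp only [decide_eq_false_iff_not]
            tauto
          rw [dA, dB]
          exact ih (collatz_step c) hc'

-- ===== VERDICT (by name: the statement is the Claim_ definition above) =====
theorem count_discrete_fixed_points_spec : Claim_equal_count_discrete_fixed_points := by
  intro period upper _
  unfold Spec_count_discrete_fixed_points count_discrete_fixed_points count_discrete_fixed_points_alt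
  by_cases hu : upper < 1
  · rw [if_pos hu, PySem.List.pyRange_one_eq_nil (a := (1:Int)) (b := upper + 1) (by omega)]
    rfl
  · rw [if_neg hu]
    rw [not_lt] at hu
    by_cases hp : period ≤ 0
    · rw [if_pos hp, PySem.List.pyRange_one_eq_nil (a := (0:Int)) (b := period) (by omega)]
      simp only [List.foldl_nil, if_true]
      rw [PySem.List.foldl_add]
      rw [PySem.List.sum_map_const_int, PySem.List.length_pyRange_one]
      omega
    · rw [if_neg hp]
      rw [not_le] at hp
      apply PySem.List.foldl_congr_mem
      intro acc n hnmem
      have hn : 1 ≤ n ∧ n < upper + 1 := (PySem.List.mem_pyRange_one.mp hnmem)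
      rw [pv_foldl_iter (pvStepA upper), pv_foldl_iter (pvStepB upper),
        PySem.List.length_pyRange_one]
      set k : Nat := (period - 0).toNat with hk
      have hkp : (k : Int) = period := by omega
      by_cases hC : pvC n
      · rw [if_pos (show n = 1 ∨ n = 2 ∨ n = 4 from hC), pv_iterA_C hu k n hC]
        have hfix : collatz_step^[k] n = n ↔ k % 3 = 0 := pv_fix_iff hC k
        have hmod : PySem.Int.mod period 3 = 0 ↔ k % 3 = 0 := by
          rw [PySem.Int.mod_eq_zero_iff_dvd]
          omega
        have : ((collatz_step^[k] n, false).1 = n) ↔ (PySem.Int.mod period 3 = 0) := by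
          rw [hmod]; exact hfix
        exact congrArg (acc + ·) (if_congr this rfl rfl)
      · rw [if_neg (show ¬ (n = 1 ∨ n = 2 ∨ n = 4) from hC)]
        have := pv_agree (n := n) hu hC k n hn.1
        exact congrArg (acc + ·) (if_congr this rfl rfl)
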